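-- pv_equiv track=rewrite | github.com/bindu2302/InterviewPrep | Preparation_Python/2025/ClosestNum.py | closestNum
-- ===== SOURCE A (Python) =====
-- def closestNum(n,m):
--     closest = 0
--     mindiff = float('inf')
--
--     for i in range(n-abs(m), n+abs(m) + 1):
--         if i % m ==0:
--             diff = abs(n-i)
--             if(diff < mindiff or diff == mindiff and abs(i) > abs(closest)):
--                 closest = i
--                 mindiff = diff
--     return closest
-- ===== SOURCE B (Python) =====
-- def closestNum(n, m):
--     k = abs(m)
--     a = (n // k) * k          # largest multiple of |m| (= of m) that is <= n
--     b = a + k                 # smallest multiple strictly greater than a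
--     if n - a < b - n:
--         return a
--     if b - n < n - a:
--         return b
--     return a if abs(a) > abs(b) else b
-- ===== Notes on version B (the rewrite author's own statement) =====
-- stated objective: faster
-- what changed: B replaces A's scan of all 2|m|+1 integers in the window [n-|m|, n+|m|] by computing the two bracketing multiples with one floor division and picking by distance (ties by larger absolute value).
-- outside the precondition, e.g. on closestNum(5, 0): A raises ZeroDivisionError, B raises ZeroDivisionError
import Mathlib
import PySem

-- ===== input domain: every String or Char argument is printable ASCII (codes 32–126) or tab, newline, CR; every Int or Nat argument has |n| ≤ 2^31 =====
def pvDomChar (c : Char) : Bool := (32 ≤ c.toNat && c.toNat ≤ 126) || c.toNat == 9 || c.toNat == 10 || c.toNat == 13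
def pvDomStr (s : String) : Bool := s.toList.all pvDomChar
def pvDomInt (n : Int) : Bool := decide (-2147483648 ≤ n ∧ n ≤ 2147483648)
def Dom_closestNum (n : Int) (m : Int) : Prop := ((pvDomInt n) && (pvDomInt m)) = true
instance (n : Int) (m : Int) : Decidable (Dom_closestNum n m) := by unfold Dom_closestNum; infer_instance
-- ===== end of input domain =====

-- B replaces A's O(|m|) scan of the whole window [n-|m|, n+|m|] with an O(1) closed form:
-- the two bracketing multiples via one floor division, picked by distance, ties by larger absolute value.

-- ===== PORT A =====
-- Python's float('inf') sentinel for mindiff is represented as `none` (none = +infinity: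
-- any diff compares below it), exact because mindiff is otherwise always an int |n - i|.
-- loop body for a multiple i: 'diff = abs(n-i); if diff < mindiff or ...: closest, mindiff = i, diff'
def closestNumUpd (n : Int) (s : Int × Option Int) (i : Int) : Int × Option Int :=
  let diff := |n - i|
  let ok := match s.2 with
    | none => true
    | some md => decide (diff < md) || (diff == md && decide (|i| > |s.1|))
  if ok then (i, some diff) else s

def closestNum (n : Int) (m : Int) : Int :=
  (((PySem.List.pyRange (n - |m|) (n + |m| + 1) 1).foldl
      (fun (s : Int × Option Int) (i : Int) =>
        if PySem.Int.mod i m == 0 then closestNumUpd n s i else s)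
      (0, none))).1

-- ===== PORT B =====
def closestNum_alt (n : Int) (m : Int) : Int :=
  let k := |m|
  let a := (PySem.Int.floordiv n k) * k
  let b := a + k
  if n - a < b - n then a
  else if b - n < n - a then b
  else if |a| > |b| then a else b

-- ===== PRECONDITION & SPEC =====
-- A raises ZeroDivisionError (i % 0) when m = 0; excluded.
def Pre_closestNum (n : Int) (m : Int) : Prop := m ≠ 0
instance (n : Int) (m : Int) : Decidable (Pre_closestNum n m) := by unfold Pre_closestNum; infer_instance
def pvWitness_closestNum : Int × Int := (7, 3)

def Spec_closestNum (n : Int) (m : Int) (out : Int) : Prop := out = closestNum_alt n m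
instance (n : Int) (m : Int) (out : Int) : Decidable (Spec_closestNum n m out) := by unfold Spec_closestNum; infer_instance

-- ===== CLAIM (what is proved, stated in full; the proofs are below) =====
def Claim_equal_closestNum : Prop := ∀ (n : Int) (m : Int), Dom_closestNum n m → Pre_closestNum n m → Spec_closestNum n m (closestNum n m)

-- ===== LEMMAS AND PROOFS =====

-- no multiple of k strictly between consecutive multiples c and c + k
lemma no_mult_between (k c i : Int) (hk : 0 < k) (hc : k ∣ c)
    (h1 : c < i) (h2 : i < c + k) : ¬ k ∣ i := by
  rintro ⟨t, rfl⟩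
  obtain ⟨s, rfl⟩ := hc
  have hst : s < t := by
    have := h1
    nlinarith [mul_lt_mul_of_pos_left (show s < t from by nlinarith) hk]
  nlinarith

lemma filter_range_empty (m k lo hi c : Int) (hk : k = |m|) (hkpos : 0 < k)
    (hc : k ∣ c) (hlo : c < lo) (hhi : hi ≤ c + k) :
    (PySem.List.pyRange lo hi 1).filter (fun i => PySem.Int.mod i m == 0) = [] := by
  rw [List.filter_eq_nil_iff]
  intro i hi'
  rw [PySem.List.mem_pyRange_one] at hi'
  simp only [beq_iff_eq]
  rw [PySem.Int.mod_eq_zero_iff_dvd]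
  intro hdvd
  have : k ∣ i := by rw [hk, abs_dvd]; exact hdvd
  exact no_mult_between k c i hkpos hc (by omega) (by omega) this

lemma filter_range_singleton (m k c : Int) (hk : k = |m|) (hkpos : 0 < k) (hc : k ∣ c) :
    (PySem.List.pyRange c (c + 1) 1).filter (fun i => PySem.Int.mod i m == 0) = [c] := by
  rw [PySem.List.pyRange_one_singleton]
  have hm : m ≠ 0 := by intro h; rw [h] at hk; simp at hk; omega
  have : PySem.Int.mod c m = 0 := by
    rw [PySem.Int.mod_eq_zero_iff_dvd, ← abs_dvd, ← hk]; exact hc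
  simp [this]

theorem closestNum_eq (n m : Int) (hm : m ≠ 0) : closestNum n m = closestNum_alt n m := by
  set k := |m| with hk
  have hkpos : 0 < k := by rw [hk]; exact abs_pos.mpr hm
  set q := PySem.Int.floordiv n k with hq
  have hbr : q * k ≤ n ∧ n < (q + 1) * k :=
    (PySem.Int.floordiv_eq_iff_of_pos hkpos).mp hq.symm
  obtain ⟨ha1, ha2⟩ := hbr
  set a := q * k with ha
  have hadvd : k ∣ a := ⟨q, by rw [ha, mul_comm]⟩
  have hbdvd : k ∣ a + k := by exact dvd_add hadvd dvd_rfl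
  have hb2 : n < a + k := by rw [ha]; nlinarith
  -- rewrite A's fold as a fold over the multiples only
  unfold closestNum
  rw [show (fun (s : Int × Option Int) (i : Int) =>
        if PySem.Int.mod i m == 0 then closestNumUpd n s i else s) = (fun s i =>
        if (fun j => PySem.Int.mod j m == 0) i = true then closestNumUpd n s i else s) from rfl,
      ← List.foldl_filter]
  by_cases hmid : a = n
  · -- n itself is a multiple: the window contains n-k, n, n+k
    have hsplit : (PySem.List.pyRange (n - |m|) (n + |m| + 1) 1).filter
        (fun i => PySem.Int.mod i m == 0) = [n - k, n, n + k] := by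
      rw [← hk,
        PySem.List.pyRange_one_append (n - k) (n - k + 1) (n + k + 1) (by omega) (by omega),
        PySem.List.pyRange_one_append (n - k + 1) n (n + k + 1) (by omega) (by omega),
        PySem.List.pyRange_one_append n (n + 1) (n + k + 1) (by omega) (by omega),
        PySem.List.pyRange_one_append (n + 1) (n + k) (n + k + 1) (by omega) (by omega)]
      simp only [List.filter_append]
      have hn : k ∣ n := hmid ▸ hadvd
      rw [filter_range_singleton m k (n - k) hk hkpos (dvd_sub hn dvd_rfl),
          filter_range_empty m k (n - k + 1) n (n - k) hk hkpos (dvd_sub hn dvd_rfl) (by omega) (by omega),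
          filter_range_singleton m k n hk hkpos hn,
          filter_range_empty m k (n + 1) (n + k) n hk hkpos hn (by omega) (by omega),
          filter_range_singleton m k (n + k) hk hkpos (dvd_add hn dvd_rfl)]
      simp
    rw [hsplit]
    simp only [List.foldl, closestNumUpd]
    -- evaluate the three steps
    have h1 : |n - (n - k)| = k := by rw [abs_of_pos] <;> omega
    have h2 : |n - n| = 0 := by simp
    have h3 : |n - (n + k)| = k := by rw [show n - (n+k) = -k from by ring, abs_neg, abs_of_pos hkpos]
    simp only [h1, h2, h3]
    norm_num [show ¬ (0:Int) = k from by omega, show (0:Int) < k from hkpos,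
      show ¬ k < (0:Int) from by omega]
    -- remaining: B's value is n
    unfold closestNum_alt
    simp only [← hk, ← hq, ← ha]
    rw [hmid]
    simp [show n - n < n + k - n from by omega,
      show ¬(k = 0 ∧ |n| < |n + k|) from by rintro ⟨h, _⟩; omega, hkpos]
  · have haltn : a < n := lt_of_le_of_ne ha1 hmid
    have hsplit : (PySem.List.pyRange (n - |m|) (n + |m| + 1) 1).filter
        (fun i => PySem.Int.mod i m == 0) = [a, a + k] := by
      rw [← hk,
        PySem.List.pyRange_one_append (n - k) a (n + k + 1) (by omega) (by omega),
        PySem.List.pyRange_one_append a (a + 1) (n + k + 1) (by omega) (by omega),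
        PySem.List.pyRange_one_append (a + 1) (a + k) (n + k + 1) (by omega) (by omega),
        PySem.List.pyRange_one_append (a + k) (a + k + 1) (n + k + 1) (by omega) (by omega)]
      simp only [List.filter_append]
      rw [filter_range_empty m k (n - k) a (a - k) hk hkpos
            (by exact dvd_sub hadvd dvd_rfl) (by omega) (by omega),
          filter_range_singleton m k a hk hkpos hadvd,
          filter_range_empty m k (a + 1) (a + k) a hk hkpos hadvd (by omega) (by omega),
          filter_range_singleton m k (a + k) hk hkpos hbdvd,
          filter_range_empty m k (a + k + 1) (n + k + 1) (a + k) hk hkpos hbdvd (by omega) (by omega)]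
      simp
    rw [hsplit]
    simp only [List.foldl, closestNumUpd]
    have hd1 : |n - a| = n - a := abs_of_pos (by omega)
    have hd2 : |n - (a + k)| = a + k - n := by
      rw [show n - (a + k) = -(a + k - n) from by ring, abs_neg, abs_of_pos (by omega)]
    simp only [hd1, hd2]
    unfold closestNum_alt
    simp only [← hk, ← hq, ← ha]
    by_cases hlt : a + k - n < n - a
    · -- b strictly closer
      simp [hlt, show ¬ n - a < a + k - n from by omega, beq_iff_eq,
        show ¬ a + k - n = n - a from by omega]
    · by_cases heq : a + k - n = n - a
      · -- tie: A keeps a unless |a+k| > |a|; B returns a iff |a| > |a+k|; |a| ≠ |a+k| here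
        have hne : |a| ≠ |a + k| := by
          intro habs
          have h2n : 2 * n = 2 * a + k := by omega
          rcases abs_eq_abs.mp habs with h | h
          · omega
          · -- a = -(a+k): then n = 0, so a = floordiv 0 k * k = 0, contradiction
            have hn0 : n = 0 := by omega
            have : q = 0 := by
              rw [hq, hn0]
              exact (PySem.Int.floordiv_eq_iff_of_pos hkpos).mpr (by constructor <;> nlinarith)
            rw [this] at ha
            omega
        simp only [show ¬ a + k - n < n - a from by omega, if_neg, beq_iff_eq, heq,
          show ¬ n - a < n - a from lt_irrefl _, if_false, decide_eq_true_eq]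
        by_cases habs : |a + k| > |a|
        · simp [habs, show ¬ |a| > |a + k| from by omega, show ¬ n - a < a + k - n from by omega,
            show ¬ a + k - n < n - a from by omega, heq]
        · simp [habs, show |a| > |a + k| from by
              rcases lt_trichotomy (|a|) (|a + k|) with h | h | h
              · omega
              · exact absurd h hne
              · exact h,
            show ¬ n - a < a + k - n from by omega, show ¬ a + k - n < n - a from by omega, heq]
      · -- a strictly closer
        simp [show ¬ a + k - n < n - a from by omega, beq_iff_eq, heq,
          show n - a < a + k - n from by omega]

-- ===== VERDICT (by name: the statement is the Claim_ definition above) =====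
theorem closestNum_spec : Claim_equal_closestNum := by
  intro n m _ hm
  unfold Spec_closestNum
  exact closestNum_eq n m hm
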